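-- pv_equiv track=rewrite | github.com/do-develop/python_practice | leet2086_minimum-number-of-food-buckets-to-feed-the-hamsters.py | minimumBuckets
-- ===== SOURCE A (Python) =====
-- def minimumBuckets(hamsters: str) -> int:
--     hamsters = list(hamsters)
--     buckets = 0
--
--     for i, v in enumerate(hamsters):
--         if v == 'H' and (i == 0 or hamsters[i-1] != '#'):
--             if i + 1 < len(hamsters) and hamsters[i + 1] == '.':
--                 hamsters[i + 1] = '#'
--             elif i and hamsters[i - 1] == '.':
--                 hamsters[i - 1] = '#'
--             else:
--                 return -1
--             buckets += 1
--     return buckets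
-- ===== SOURCE B (Python) =====
-- def minimumBuckets(hamsters: str) -> int:
--     n = len(hamsters)
--     # infeasible iff some 'H' has no '.' neighbour
--     for i in range(n):
--         if hamsters[i] == 'H' and (i == 0 or hamsters[i - 1] != '.') and (i == n - 1 or hamsters[i + 1] != '.'):
--             return -1
--     # one bucket per hamster, minus one for every non-overlapping shared 'H.H'
--     return hamsters.count('H') - hamsters.count('H.H')
-- ===== Notes on version B (the rewrite author's own statement) =====
-- stated objective: simpler
-- what changed: Replaced the mutating greedy simulation (list copy, '#' sentinel writes, bucket counter) by a closed-form answer: a read-only feasibility scan (some 'H' with no '.' neighbour -> -1) and then count('H') - count('H.H'), since each non-overlapping 'H.H' is one shared bucket.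
-- outside the precondition, e.g. on minimumBuckets('#H'): A returns 0, B returns -1; on minimumBuckets('.#H.'): A returns 0, B returns 1
import Mathlib
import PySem

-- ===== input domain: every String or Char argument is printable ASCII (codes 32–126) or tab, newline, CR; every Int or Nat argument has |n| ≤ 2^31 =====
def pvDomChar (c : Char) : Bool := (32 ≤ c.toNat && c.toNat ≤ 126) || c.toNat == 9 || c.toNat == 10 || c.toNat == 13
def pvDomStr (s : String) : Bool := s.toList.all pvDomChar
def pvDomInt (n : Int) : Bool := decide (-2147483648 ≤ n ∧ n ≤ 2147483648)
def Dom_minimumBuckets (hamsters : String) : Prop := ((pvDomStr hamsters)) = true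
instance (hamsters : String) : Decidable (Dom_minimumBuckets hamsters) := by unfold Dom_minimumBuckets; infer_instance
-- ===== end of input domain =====

-- B replaces A's mutating greedy simulation ('#' sentinel writes into a list copy, bucket counter)
-- by a read-only feasibility scan plus the closed form count('H') - count('H.H'); objective: simpler.


-- ===== PORT A =====
-- literal transliteration of A's indexed loop over the live (mutated) list of characters;
-- every index read is guarded exactly as in the Python, so getD is exact
def minimumBucketsGo (l : List Char) (i : Nat) (buckets : Int) : Int :=
  if hlt : i < l.length then
    let v := l.getD i ' '
    if v = 'H' ∧ (i = 0 ∨ l.getD (i - 1) ' ' ≠ '#') then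
      if i + 1 < l.length ∧ l.getD (i + 1) ' ' = '.' then
        minimumBucketsGo (l.set (i + 1) '#') (i + 1) (buckets + 1)
      else if i ≠ 0 ∧ l.getD (i - 1) ' ' = '.' then
        minimumBucketsGo (l.set (i - 1) '#') (i + 1) (buckets + 1)
      else -1
    else minimumBucketsGo l (i + 1) buckets
  else buckets
termination_by l.length - i
decreasing_by all_goals first | omega | (simp only [List.length_set]; omega)

def minimumBuckets (hamsters : String) : Int :=
  minimumBucketsGo hamsters.toList 0 0

-- ===== PORT B =====
-- Source B's feasibility loop: some 'H' with no '.' neighbour → -1 (reads are guarded, getD is exact)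
def minimumBucketsAltGo (l : List Char) (i : Nat) : Bool :=
  if i < l.length then
    if l.getD i ' ' = 'H' ∧ (i = 0 ∨ l.getD (i - 1) ' ' ≠ '.')
        ∧ (i = l.length - 1 ∨ l.getD (i + 1) ' ' ≠ '.') then
      true
    else minimumBucketsAltGo l (i + 1)
  else false
termination_by l.length - i

def minimumBuckets_alt (hamsters : String) : Int :=
  if minimumBucketsAltGo hamsters.toList 0 then -1
  else (PySem.Str.count hamsters "H" : Int) - (PySem.Str.count hamsters "H.H" : Int)

-- ===== PRECONDITION & SPEC =====
-- Pre_ excludes exactly the strings containing the substring "#H": A uses '#' in-band as its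
-- bucket sentinel, so an input '#' directly left of an 'H' makes A treat that hamster as already
-- fed — an accidental value of the sentinel encoding ('#' anywhere else is an ordinary blocker,
-- and A = B is claimed there).
def Pre_minimumBuckets (hamsters : String) : Prop :=
  (PySem.Str.isIn "#H" hamsters) = false
instance (hamsters : String) : Decidable (Pre_minimumBuckets hamsters) := by
  unfold Pre_minimumBuckets; infer_instance

def pvWitness_minimumBuckets : String := "H.H"

def Spec_minimumBuckets (hamsters : String) (out : Int) : Prop := out = minimumBuckets_alt hamsters
instance (hamsters : String) (out : Int) : Decidable (Spec_minimumBuckets hamsters out) := by unfold Spec_minimumBuckets; infer_instance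

-- ===== CLAIM (what is proved, stated in full; the proofs are below) =====
def Claim_equal_minimumBuckets : Prop := ∀ (hamsters : String), Dom_minimumBuckets hamsters → Pre_minimumBuckets hamsters → Spec_minimumBuckets hamsters (minimumBuckets hamsters)

-- ===== LEMMAS AND PROOFS =====
inductive PvSt where
  | other : PvSt
  | dot : PvSt
  | bucket : PvSt
deriving DecidableEq

def gRef : PvSt → List Char → Option Nat
  | _, [] => some 0
  | p, c :: r =>
    if c = 'H' then
      if p = PvSt.bucket then gRef PvSt.other r
      else if r.head? = some '.' then (gRef PvSt.bucket r.tail).map (· + 1)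
      else if p = PvSt.dot then (gRef PvSt.other r).map (· + 1) else none
    else if c = '.' then gRef PvSt.dot r
    else gRef PvSt.other r
termination_by _ l => l.length
decreasing_by all_goals (simp [List.length_tail]; try omega)

def catOf : Option Char → PvSt
  | some c => if c = '#' then PvSt.bucket else if c = '.' then PvSt.dot else PvSt.other
  | none => PvSt.other

def cHdH : List Char → Nat
  | 'H' :: '.' :: 'H' :: r => cHdH r + 1
  | _ :: r => cHdH r
  | [] => 0

def wBad : Bool → List Char → Bool
  | _, [] => false
  | p, c :: r => if c = 'H' ∧ p = false ∧ r.head? ≠ some '.' then true else wBad (c == '.') r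

theorem cHdH_le_count (l : List Char) : cHdH l ≤ l.count 'H' := by
  fun_induction cHdH l <;> simp_all [List.count_cons] <;> omega

theorem gRef_dot (p : PvSt) (x : List Char) : gRef p ('.'::x) = gRef PvSt.dot x := by simp [gRef]
theorem gRef_nonH (p : PvSt) (c : Char) (hc : c ≠ 'H') (x : List Char) :
    gRef p (c::x) = if c = '.' then gRef PvSt.dot x else gRef PvSt.other x := by simp [gRef, hc]
theorem gRef_H_bucket (x : List Char) : gRef PvSt.bucket ('H'::x) = gRef PvSt.other x := by simp [gRef]
theorem gRef_H_dotnext (p : PvSt) (h : p ≠ PvSt.bucket) (x : List Char) :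
    gRef p ('H'::'.'::x) = (gRef PvSt.bucket x).map (· + 1) := by simp [gRef, h]
theorem gRef_H_stuck (p : PvSt) (h : p ≠ PvSt.bucket) (x : List Char) (hx : x.head? ≠ some '.') :
    gRef p ('H'::x) = if p = PvSt.dot then (gRef PvSt.other x).map (· + 1) else none := by
  simp [gRef, h, hx]
theorem gRef_bucket_eq (x : List Char) (hx : x.head? ≠ some 'H') :
    gRef PvSt.bucket x = gRef PvSt.other x := by
  cases x with
  | nil => simp [gRef]
  | cons c r =>
    have hc : ¬ (c = 'H') := by simpa using hx
    simp [gRef, hc]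

theorem cHdH_nonH (c : Char) (hc : c ≠ 'H') (x : List Char) : cHdH (c::x) = cHdH x := by
  simp [cHdH, hc]
theorem cHdH_H_non (c2 : Char) (hc2 : c2 ≠ '.') (x : List Char) :
    cHdH ('H'::c2::x) = cHdH (c2::x) := by
  simp [cHdH, hc2]
theorem cHdH_Hd_non (c3 : Char) (hc3 : c3 ≠ 'H') (x : List Char) :
    cHdH ('H'::'.'::c3::x) = cHdH ('.'::c3::x) := by
  simp [cHdH, hc3]
theorem cHdH_HdH (x : List Char) : cHdH ('H'::'.'::'H'::x) = cHdH x + 1 := by simp [cHdH]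

theorem wBad_nil (p : Bool) : wBad p [] = false := by simp [wBad]
theorem wBad_nonH (p : Bool) (c : Char) (hc : c ≠ 'H') (r : List Char) :
    wBad p (c::r) = wBad (c == '.') r := by simp [wBad, hc]
theorem wBad_H_ok (p : Bool) (r : List Char) (h : ¬ (p = false ∧ r.head? ≠ some '.')) :
    wBad p ('H'::r) = wBad false r := by simp [wBad, h]
theorem wBad_H_bad (r : List Char) (h : r.head? ≠ some '.') :
    wBad false ('H'::r) = true := by simp [wBad, h]
theorem lemC (n : Nat) : ∀ l : List Char, l.length = n →
    (wBad false l = true → gRef PvSt.other l = none)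
    ∧ (wBad false l = false → gRef PvSt.other l = some (l.count 'H' - cHdH l)) := by
  induction n using Nat.strong_induction_on with
  | _ n IH =>
  intro l hlen
  subst hlen
  rcases l with _ | ⟨c, r⟩
  · exact ⟨fun hb => by simp [wBad_nil] at hb, fun _ => by simp [gRef, cHdH]⟩
  by_cases hc : c = 'H'
  · subst hc
    rcases r with _ | ⟨c2, r2⟩
    · -- "H"
      refine ⟨fun _ => ?_, fun hb => ?_⟩
      · simpa using gRef_H_stuck PvSt.other (by simp) [] (by simp)
      · rw [wBad_H_bad [] (by simp)] at hb; simp at hb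
    by_cases hc2 : c2 = '.'
    · subst hc2
      -- "H.…"
      have hg : gRef PvSt.other ('H'::'.'::r2) = (gRef PvSt.bucket r2).map (· + 1) :=
        gRef_H_dotnext _ (by simp) _
      have hw : wBad false ('H'::'.'::r2) = wBad true r2 := by
        rw [wBad_H_ok false ('.'::r2) (by simp), wBad_nonH _ _ (by simp)]
        simp
      rcases r2 with _ | ⟨c3, r3⟩
      · -- "H."
        refine ⟨fun hb => ?_, fun _ => ?_⟩
        · rw [hw, wBad_nil] at hb; simp at hb
        · simp [hg, gRef, cHdH]
      by_cases hc3 : c3 = 'H'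
      · subst hc3
        -- "H.H…"
        have hg2 : gRef PvSt.other ('H'::'.'::'H'::r3)
            = (gRef PvSt.other r3).map (· + 1) := by rw [hg, gRef_H_bucket]
        have hw2 : wBad false ('H'::'.'::'H'::r3) = wBad false r3 := by
          rw [hw, wBad_H_ok true r3 (by simp)]
        obtain ⟨ih1, ih2⟩ := IH r3.length (by simp; omega) r3 rfl
        refine ⟨fun hb => ?_, fun hnb => ?_⟩
        · rw [hg2, ih1 (by rw [← hw2]; exact hb)]; rfl
        · have hle := cHdH_le_count r3
          rw [hg2, ih2 (by rw [← hw2]; exact hnb)]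
          simp [List.count_cons, cHdH_HdH]
          omega
      · -- "H.c…" with c3 ≠ 'H' (c3 = '.' or blocker behave alike)
        have hg2 : gRef PvSt.other ('H'::'.'::c3::r3)
            = (gRef PvSt.other (c3::r3)).map (· + 1) := by
          rw [hg, gRef_bucket_eq _ (by simp [hc3])]
        have hw2 : wBad false ('H'::'.'::c3::r3) = wBad false (c3::r3) := by
          rw [hw, wBad_nonH _ _ hc3, wBad_nonH _ _ hc3]
        obtain ⟨ih1, ih2⟩ := IH (c3::r3).length (by simp) (c3::r3) rfl
        refine ⟨fun hb => ?_, fun hnb => ?_⟩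
        · rw [hg2, ih1 (by rw [← hw2]; exact hb)]; rfl
        · have hle := cHdH_le_count (c3::r3)
          rw [hg2, ih2 (by rw [← hw2]; exact hnb)]
          rw [cHdH_Hd_non c3 hc3, cHdH_nonH '.' (by simp)]
          simp [List.count_cons] at hle ⊢
          omega
    · -- "Hc…" with c2 ≠ '.': stuck, infeasible
      refine ⟨fun _ => ?_, fun hb => ?_⟩
      · simpa using gRef_H_stuck PvSt.other (by simp) (c2::r2) (by simp [hc2])
      · rw [wBad_H_bad (c2::r2) (by simp [hc2])] at hb; simp at hb
  · -- non-'H' head: A skips it; counts unaffected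
    have hw : wBad false (c::r) = wBad (c == '.') r := wBad_nonH _ _ hc _
    by_cases hcd : c = '.'
    · subst hcd
      -- ".…"
      have hg0 : gRef PvSt.other ('.'::r) = gRef PvSt.dot r := gRef_dot _ _
      rcases r with _ | ⟨c2, r2⟩
      · exact ⟨fun hb => by simp [wBad] at hb, fun _ => by simp [hg0, gRef, cHdH]⟩
      by_cases hc2 : c2 = 'H'
      · subst hc2
        -- ".H…"
        have hw1 : wBad false ('.'::'H'::r2) = wBad false r2 := by
          rw [hw]
          simp only [beq_self_eq_true]
          rw [wBad_H_ok true r2 (by simp)]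
        rcases r2 with _ | ⟨c3, r3⟩
        · -- ".H"
          refine ⟨fun hb => ?_, fun _ => ?_⟩
          · rw [hw1, wBad_nil] at hb; simp at hb
          · rw [hg0, gRef_H_stuck PvSt.dot (by simp) [] (by simp)]
            simp [gRef, cHdH, List.count_cons]
        by_cases hc3 : c3 = '.'
        · subst hc3
          -- ".H.…"
          have hg1 : gRef PvSt.other ('.'::'H'::'.'::r3)
              = (gRef PvSt.bucket r3).map (· + 1) := by
            rw [hg0, gRef_H_dotnext PvSt.dot (by simp)]
          have hw2 : wBad false ('.'::'H'::'.'::r3) = wBad true r3 := by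
            rw [hw1, wBad_nonH _ _ (by simp)]; simp
          rcases r3 with _ | ⟨c4, r4⟩
          · -- ".H."
            refine ⟨fun hb => ?_, fun _ => ?_⟩
            · rw [hw2, wBad_nil] at hb; simp at hb
            · simp [hg1, gRef, cHdH, List.count_cons]
          by_cases hc4 : c4 = 'H'
          · subst hc4
            -- ".H.H…"
            have hg2 : gRef PvSt.other ('.'::'H'::'.'::'H'::r4)
                = (gRef PvSt.other r4).map (· + 1) := by rw [hg1, gRef_H_bucket]
            have hw3 : wBad false ('.'::'H'::'.'::'H'::r4) = wBad false r4 := by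
              rw [hw2, wBad_H_ok true r4 (by simp)]
            obtain ⟨ih1, ih2⟩ := IH r4.length (by simp; omega) r4 rfl
            refine ⟨fun hb => ?_, fun hnb => ?_⟩
            · rw [hg2, ih1 (by rw [← hw3]; exact hb)]; rfl
            · have hle := cHdH_le_count r4
              rw [hg2, ih2 (by rw [← hw3]; exact hnb)]
              rw [cHdH_nonH '.' (by simp), cHdH_HdH]
              simp [List.count_cons]
              omega
          · -- ".H.c…" with c4 ≠ 'H'
            have hg2 : gRef PvSt.other ('.'::'H'::'.'::c4::r4)
                = (gRef PvSt.other (c4::r4)).map (· + 1) := by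
              rw [hg1, gRef_bucket_eq _ (by simp [hc4])]
            have hw3 : wBad false ('.'::'H'::'.'::c4::r4) = wBad false (c4::r4) := by
              rw [hw2, wBad_nonH _ _ hc4, wBad_nonH _ _ hc4]
            obtain ⟨ih1, ih2⟩ := IH (c4::r4).length (by simp) (c4::r4) rfl
            refine ⟨fun hb => ?_, fun hnb => ?_⟩
            · rw [hg2, ih1 (by rw [← hw3]; exact hb)]; rfl
            · have hle := cHdH_le_count (c4::r4)
              rw [hg2, ih2 (by rw [← hw3]; exact hnb)]
              rw [cHdH_nonH '.' (by simp), cHdH_Hd_non c4 hc4, cHdH_nonH '.' (by simp)]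
              simp [List.count_cons] at hle ⊢
              omega
        · -- ".Hc…" with c3 ≠ '.': the H feeds from the left dot
          have hg2 : gRef PvSt.other ('.'::'H'::c3::r3)
              = (gRef PvSt.other (c3::r3)).map (· + 1) := by
            rw [hg0, gRef_H_stuck PvSt.dot (by simp) (c3::r3) (by simp [hc3])]
            simp
          have hw2 : wBad false ('.'::'H'::c3::r3) = wBad false (c3::r3) := hw1
          obtain ⟨ih1, ih2⟩ := IH (c3::r3).length (by simp) (c3::r3) rfl
          refine ⟨fun hb => ?_, fun hnb => ?_⟩
          · rw [hg2, ih1 (by rw [← hw2]; exact hb)]; rfl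
          · have hle := cHdH_le_count (c3::r3)
            rw [hg2, ih2 (by rw [← hw2]; exact hnb)]
            rw [cHdH_nonH '.' (by simp), cHdH_H_non c3 hc3]
            simp [List.count_cons] at hle ⊢
            omega
      · -- ".c…" with c2 ≠ 'H'
        have hg2 : gRef PvSt.other ('.'::c2::r2) = gRef PvSt.other (c2::r2) := by
          rw [hg0, gRef_nonH PvSt.dot c2 hc2, gRef_nonH PvSt.other c2 hc2]
        have hw2 : wBad false ('.'::c2::r2) = wBad false (c2::r2) := by
          rw [hw, wBad_nonH _ _ hc2, wBad_nonH _ _ hc2]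
        obtain ⟨ih1, ih2⟩ := IH (c2::r2).length (by simp) (c2::r2) rfl
        refine ⟨fun hb => ?_, fun hnb => ?_⟩
        · rw [hg2, ih1 (by rw [← hw2]; exact hb)]
        · rw [hg2, ih2 (by rw [← hw2]; exact hnb)]
          rw [cHdH_nonH '.' (by simp)]
          simp [List.count_cons]
    · -- blocker head
      have hg2 : gRef PvSt.other (c::r) = gRef PvSt.other r := by
        rw [gRef_nonH PvSt.other c hc, if_neg hcd]
      have hw2 : wBad false (c::r) = wBad false r := by
        rw [hw]
        have : (c == '.') = false := by simp [hcd]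
        rw [this]
      obtain ⟨ih1, ih2⟩ := IH r.length (by simp) r rfl
      refine ⟨fun hb => ?_, fun hnb => ?_⟩
      · rw [hg2, ih1 (by rw [← hw2]; exact hb)]
      · rw [hg2, ih2 (by rw [← hw2]; exact hnb)]
        rw [cHdH_nonH c hc]
        simp [List.count_cons, hc]
theorem getD_append_len (pre : List Char) (c : Char) (r : List Char) (d : Char) :
    (pre ++ c :: r).getD pre.length d = c := by
  simp [List.getD_eq_getElem?_getD, List.getElem?_append_right (le_refl pre.length)]
theorem getD_append_len1 (pre : List Char) (c c2 : Char) (r : List Char) (d : Char) :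
    (pre ++ c :: c2 :: r).getD (pre.length + 1) d = c2 := by
  simp [List.getD_eq_getElem?_getD,
    List.getElem?_append_right (Nat.le_succ_of_le (le_refl pre.length))]
theorem getD_append_pred (pre suf : List Char) (d : Char) (h : pre ≠ []) :
    (pre ++ suf).getD (pre.length - 1) d = (pre.getLast?).getD d := by
  have hlen : pre.length - 1 < pre.length := by
    cases pre with | nil => simp at h | cons a t => simp
  simp [List.getD_eq_getElem?_getD, List.getElem?_append_left hlen, List.getLast?_eq_getElem?]

theorem lemB : ∀ (suf pre : List Char),
    minimumBucketsAltGo (pre ++ suf) pre.length = wBad (pre.getLast? == some '.') suf := by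
  intro suf
  induction suf with
  | nil =>
    intro pre
    rw [minimumBucketsAltGo]
    simp [wBad_nil]
  | cons c r ih =>
    intro pre
    rw [minimumBucketsAltGo, if_pos (by simp : pre.length < (pre ++ c :: r).length)]
    have hprev : (pre.length = 0 ∨ (pre ++ c :: r).getD (pre.length - 1) ' ' ≠ '.')
        ↔ (pre.getLast? == some '.') = false := by
      rcases hL : pre.getLast? with _ | pc
      · have hpre : pre = [] := List.getLast?_eq_none_iff.mp hL
        subst hpre
        simp
      · have hpre : pre ≠ [] := by intro h; subst h; simp at hL
        rw [getD_append_pred _ _ _ hpre, hL]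
        have : pre.length ≠ 0 := by simpa [List.length_eq_zero_iff] using hpre
        simp [this]
    have hnext : (pre.length = (pre ++ c :: r).length - 1
        ∨ (pre ++ c :: r).getD (pre.length + 1) ' ' ≠ '.')
        ↔ r.head? ≠ some '.' := by
      rcases r with _ | ⟨c2, r2⟩
      · simp
      · rw [getD_append_len1]
        simp
        try omega
    rw [getD_append_len]
    by_cases hcond : c = 'H' ∧ (pre.getLast? == some '.') = false ∧ r.head? ≠ some '.'
    · rw [if_pos (by rw [hprev, hnext]; exact hcond)]
      rw [wBad]
      rw [if_pos (show c = 'H' ∧ (pre.getLast? == some '.') = false ∧ r.head? ≠ some '.' from hcond)]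
    · rw [if_neg (by rw [hprev, hnext]; exact hcond)]
      have hre : pre ++ c :: r = (pre ++ [c]) ++ r := by simp
      have hlen' : pre.length + 1 = (pre ++ [c]).length := by simp
      rw [hre, hlen', ih (pre ++ [c])]
      rw [List.getLast?_concat]
      conv_rhs => rw [wBad]
      rw [if_neg (show ¬ (c = 'H' ∧ (pre.getLast? == some '.') = false ∧ r.head? ≠ some '.') from hcond)]
      simp
theorem inf_tail {c : Char} {r : List Char} (h : ¬ ['#','H'] <:+: (c::r)) :
    ¬ ['#','H'] <:+: r :=
  fun hx => h (List.infix_cons_iff.mpr (Or.inr hx))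

theorem lemA (n : Nat) : ∀ suf : List Char, suf.length = n → (¬ ['#','H'] <:+: suf) →
    ∀ (pre : List Char) (b : Int),
    minimumBucketsGo (pre ++ suf) pre.length b
      = (gRef (catOf pre.getLast?) suf).elim (-1) (fun k => b + (k : Int)) := by
  induction n using Nat.strong_induction_on with
  | _ n IH =>
  intro suf hlen hp pre b
  subst hlen
  rcases suf with _ | ⟨c, r⟩
  · rw [minimumBucketsGo]
    simp [gRef]
  have hlt : pre.length < (pre ++ c :: r).length := by simp
  by_cases hc : c = 'H'
  · subst hc
    -- current char 'H'
    by_cases hB : catOf pre.getLast? = PvSt.bucket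
    · -- previous char is a bucket: skip
      rcases hL : pre.getLast? with _ | pc
      · simp [hL, catOf] at hB
      have hpc : pc = '#' := by
        by_contra hne
        simp [catOf, hL, hne] at hB
        split_ifs at hB <;> simp_all
      subst hpc
      have hpre : pre ≠ [] := by
        intro h; subst h; simp at hL
      have hcond : ¬ ((pre ++ 'H' :: r).getD pre.length ' ' = 'H'
          ∧ (pre.length = 0 ∨ (pre ++ 'H' :: r).getD (pre.length - 1) ' ' ≠ '#')) := by
        rw [getD_append_len, getD_append_pred _ _ _ hpre, hL]
        simp [List.length_eq_zero_iff, hpre]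
      rw [minimumBucketsGo, dif_pos hlt]
      simp only [if_neg hcond]
      have : pre ++ 'H' :: r = (pre ++ ['H']) ++ r := by simp
      rw [this]
      have hlen' : pre.length + 1 = (pre ++ ['H']).length := by simp
      rw [hlen']
      rw [IH r.length (by simp) r rfl (inf_tail hp) (pre ++ ['H']) b]
      simp [List.getLast?_concat, catOf, gRef_H_bucket]
    · -- previous char not a bucket
      have hcond : ((pre ++ 'H' :: r).getD pre.length ' ' = 'H'
          ∧ (pre.length = 0 ∨ (pre ++ 'H' :: r).getD (pre.length - 1) ' ' ≠ '#')) := by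
        refine ⟨getD_append_len _ _ _ _, ?_⟩
        rcases hL : pre.getLast? with _ | pc
        · left; simpa [List.length_eq_zero_iff] using List.getLast?_eq_none_iff.mp hL
        · right
          have hpre : pre ≠ [] := by
            intro h; subst h; simp at hL
          rw [getD_append_pred _ _ _ hpre, hL]
          intro hcontra
          simp at hcontra
          simp [catOf, hL, hcontra] at hB
      rw [minimumBucketsGo, dif_pos hlt]
      simp only [if_pos hcond]
      rcases r with _ | ⟨c2, r2⟩
      · -- suffix is exactly "H": right read fails, left '.' or -1
        have hno : ¬ (pre.length + 1 < (pre ++ ['H']).length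
            ∧ (pre ++ ['H']).getD (pre.length + 1) ' ' = '.') := by simp
        rw [if_neg hno]
        by_cases hD : catOf pre.getLast? = PvSt.dot
        · rcases hL : pre.getLast? with _ | pc
          · simp [hL, catOf] at hD
          have hpre : pre ≠ [] := by intro h; subst h; simp at hL
          have hpc : pc = '.' := by
            by_contra hne
            simp [catOf, hL, hne] at hD
            split_ifs at hD <;> simp_all
          subst hpc
          have hyes : (pre.length ≠ 0 ∧ (pre ++ ['H']).getD (pre.length - 1) ' ' = '.') := by
            rw [getD_append_pred _ _ _ hpre, hL]
            simp [List.length_eq_zero_iff, hpre]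
          rw [if_pos hyes]
          -- set inside pre, then the loop ends
          rw [minimumBucketsGo]
          have : ¬ (pre.length + 1 < (((pre ++ ['H']).set (pre.length - 1) '#')).length) := by
            simp [List.length_set]
          rw [dif_neg this]
          rw [gRef_H_stuck (catOf (some '.')) (by simp [catOf]) [] (by simp)]
          simp [catOf, gRef]
        · have hno2 : ¬ (pre.length ≠ 0 ∧ (pre ++ ['H']).getD (pre.length - 1) ' ' = '.') := by
            rcases hL : pre.getLast? with _ | pc
            · have : pre = [] := List.getLast?_eq_none_iff.mp hL
              simp [this]
            · have hpre : pre ≠ [] := by intro h; subst h; simp at hL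
              rw [getD_append_pred _ _ _ hpre, hL]
              intro hcontra
              have hpc : pc = '.' := by simpa using hcontra.2
              subst hpc
              simp [catOf, hL] at hD
          rw [if_neg hno2]
          rw [gRef_H_stuck _ hB [] (by simp), if_neg hD]
          rfl
      by_cases hc2 : c2 = '.'
      · subst hc2
        -- next char '.': place bucket to the right, then skip over it
        have hyes : (pre.length + 1 < (pre ++ 'H' :: '.' :: r2).length
            ∧ (pre ++ 'H' :: '.' :: r2).getD (pre.length + 1) ' ' = '.') := by
          rw [getD_append_len1]
          simp
        rw [if_pos hyes]
        have hset : (pre ++ 'H' :: '.' :: r2).set (pre.length + 1) '#'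
            = pre ++ 'H' :: '#' :: r2 := by
          rw [List.set_append]
          simp
        rw [hset]
        -- unfold the next iteration: it reads '#', skips
        rw [minimumBucketsGo]
        have hlt2 : pre.length + 1 < (pre ++ 'H' :: '#' :: r2).length := by simp
        rw [dif_pos hlt2]
        have hget : (pre ++ 'H' :: '#' :: r2).getD (pre.length + 1) ' ' = '#' :=
          getD_append_len1 _ _ _ _ _
        have hcond2 : ¬ ((pre ++ 'H' :: '#' :: r2).getD (pre.length + 1) ' ' = 'H'
            ∧ (pre.length + 1 = 0
              ∨ (pre ++ 'H' :: '#' :: r2).getD (pre.length + 1 - 1) ' ' ≠ '#')) := by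
          rw [hget]; simp
        simp only [if_neg hcond2]
        have hre : pre ++ 'H' :: '#' :: r2 = (pre ++ ['H', '#']) ++ r2 := by simp
        have hlen' : pre.length + 1 + 1 = (pre ++ ['H', '#']).length := by simp
        rw [hre, hlen']
        rw [IH r2.length (by simp) r2 rfl (inf_tail (inf_tail hp))
          (pre ++ ['H', '#']) (b + 1)]
        rw [gRef_H_dotnext _ hB]
        have h3 : (pre ++ ['H', '#']).getLast? = some '#' := by
          rw [show pre ++ ['H', '#'] = (pre ++ ['H']) ++ ['#'] by simp]
          exact List.getLast?_concat
        rw [h3]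
        have h4 : catOf (some '#') = PvSt.bucket := by simp [catOf]
        rw [h4]
        cases gRef PvSt.bucket r2 <;> simp <;> try omega
      · -- next char not '.': right fails, left '.' or -1
        have hno : ¬ (pre.length + 1 < (pre ++ 'H' :: c2 :: r2).length
            ∧ (pre ++ 'H' :: c2 :: r2).getD (pre.length + 1) ' ' = '.') := by
          rw [getD_append_len1]
          simp [hc2]
        rw [if_neg hno]
        by_cases hD : catOf pre.getLast? = PvSt.dot
        · rcases hL : pre.getLast? with _ | pc
          · simp [hL, catOf] at hD
          have hpre : pre ≠ [] := by intro h; subst h; simp at hL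
          have hpc : pc = '.' := by
            by_contra hne
            simp [catOf, hL, hne] at hD
            split_ifs at hD <;> simp_all
          subst hpc
          have hyes : (pre.length ≠ 0
              ∧ (pre ++ 'H' :: c2 :: r2).getD (pre.length - 1) ' ' = '.') := by
            rw [getD_append_pred _ _ _ hpre, hL]
            simp [List.length_eq_zero_iff, hpre]
          rw [if_pos hyes]
          have hset : (pre ++ 'H' :: c2 :: r2).set (pre.length - 1) '#'
              = (pre.set (pre.length - 1) '#') ++ 'H' :: c2 :: r2 := by
            rw [List.set_append]
            have : pre.length - 1 < pre.length := by
              cases pre with | nil => simp at hpre | cons a t => simp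
            simp [this]
          rw [hset]
          have hre : (pre.set (pre.length - 1) '#') ++ 'H' :: c2 :: r2
              = ((pre.set (pre.length - 1) '#') ++ ['H']) ++ c2 :: r2 := by simp
          have hlen' : pre.length + 1 = ((pre.set (pre.length - 1) '#') ++ ['H']).length := by
            simp [List.length_set]
          rw [hre, hlen']
          rw [IH (c2::r2).length (by simp) (c2::r2) rfl (inf_tail hp)
            ((pre.set (pre.length - 1) '#') ++ ['H']) (b + 1)]
          have h1 : catOf (some '.') = PvSt.dot := by simp [catOf]
          rw [h1, gRef_H_stuck PvSt.dot (by simp) (c2::r2) (by simp [hc2]),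
            List.getLast?_concat]
          have h2 : catOf (some 'H') = PvSt.other := by simp [catOf]
          rw [h2, if_pos rfl]
          cases gRef PvSt.other (c2::r2) <;> simp <;> try omega
        · have hno2 : ¬ (pre.length ≠ 0
              ∧ (pre ++ 'H' :: c2 :: r2).getD (pre.length - 1) ' ' = '.') := by
            rcases hL : pre.getLast? with _ | pc
            · have : pre = [] := List.getLast?_eq_none_iff.mp hL
              simp [this]
            · have hpre : pre ≠ [] := by intro h; subst h; simp at hL
              rw [getD_append_pred _ _ _ hpre, hL]
              intro hcontra
              have hpc : pc = '.' := by simpa using hcontra.2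
              subst hpc
              simp [catOf, hL] at hD
          rw [if_neg hno2]
          rw [gRef_H_stuck _ hB (c2::r2) (by simp [hc2]), if_neg hD]
          rfl
  · -- current char not 'H': skip
    have hcond : ¬ ((pre ++ c :: r).getD pre.length ' ' = 'H'
        ∧ (pre.length = 0 ∨ (pre ++ c :: r).getD (pre.length - 1) ' ' ≠ '#')) := by
      rw [getD_append_len]; simp [hc]
    rw [minimumBucketsGo, dif_pos hlt]
    simp only [if_neg hcond]
    have hre : pre ++ c :: r = (pre ++ [c]) ++ r := by simp
    have hlen' : pre.length + 1 = (pre ++ [c]).length := by simp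
    rw [hre, hlen']
    rw [IH r.length (by simp) r rfl (inf_tail hp) (pre ++ [c]) b]
    rw [gRef_nonH _ c hc, List.getLast?_concat]
    by_cases hcd : c = '.'
    · subst hcd
      simp [catOf, gRef_dot]
    · by_cases hcs : c = '#'
      · subst hcs
        -- an input '#' acts as a blocker; by Pre_ no 'H' follows it, and on a suffix that
        -- does not start with 'H' the bucket state behaves like the blocker state
        have hrH : r.head? ≠ some 'H' := by
          intro hx
          rcases r with _ | ⟨c2, r2⟩
          · simp at hx
          · simp at hx
            subst hx
            exact hp (List.infix_cons_iff.mpr (Or.inl (List.cons_prefix_cons.mpr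
              ⟨rfl, List.cons_prefix_cons.mpr ⟨rfl, List.nil_prefix⟩⟩)))
        rw [show catOf (some '#') = PvSt.bucket by simp [catOf]]
        rw [gRef_bucket_eq r hrH]
        simp [hcd]
      · simp [catOf, hcs, hcd]

theorem goH_eq (l : List Char) : ∀ (fuel acc : Nat), l.length ≤ fuel →
    PySem.Chars.count.go ['H'] fuel l acc = acc + l.count 'H' := by
  induction l with
  | nil => intro fuel acc h; cases fuel <;> simp [PySem.Chars.count.go]
  | cons c t ih =>
    intro fuel acc h
    cases fuel with
    | zero => simp at h
    | succ f =>
      rw [PySem.Chars.count.go.eq_def]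
      simp only []
      by_cases hc : c = 'H'
      · subst hc
        have hpre : List.isPrefixOf ['H'] ('H'::t) = true := by
          simp [List.isPrefixOf_iff_prefix, List.cons_prefix_cons]
        simp only [hpre, if_pos]
        rw [show (('H'::t).drop ['H'].length) = t by simp]
        rw [ih f (acc+1) (by simp at h; omega)]
        simp [List.count_cons]
        omega
      · have hpre : List.isPrefixOf ['H'] (c::t) = false := by
          rw [Bool.eq_false_iff]
          intro hx
          rw [List.isPrefixOf_iff_prefix, List.cons_prefix_cons] at hx
          exact hc hx.1.symm
        simp only [hpre]
        rw [if_neg (by simp)]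
        rw [ih f acc (by simp at h; omega)]
        simp [List.count_cons, hc]
theorem cHdH_cons_not (c : Char) (t : List Char) (h : ¬ ['H','.','H'] <+: (c::t)) :
    cHdH (c::t) = cHdH t := by
  by_cases hc : c = 'H'
  · subst hc
    rcases t with _ | ⟨c2, t2⟩
    · simp [cHdH]
    by_cases hc2 : c2 = '.'
    · subst hc2
      rcases t2 with _ | ⟨c3, t3⟩
      · simp [cHdH]
      by_cases hc3 : c3 = 'H'
      · subst hc3
        exact absurd ⟨t3, by simp⟩ h
      · simp [cHdH, hc3]
    · simp [cHdH, hc2]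
  · simp [cHdH, hc]
theorem goHdH_eq (n : Nat) : ∀ l : List Char, l.length = n → ∀ (fuel acc : Nat), l.length ≤ fuel →
    PySem.Chars.count.go ['H','.','H'] fuel l acc = acc + cHdH l := by
  induction n using Nat.strong_induction_on with
  | _ n IH =>
  intro l hlen fuel acc hfuel
  subst hlen
  rcases l with _ | ⟨c, t⟩
  · cases fuel <;> rw [PySem.Chars.count.go.eq_def] <;> simp [cHdH]
  cases fuel with
  | zero => simp at hfuel
  | succ f =>
    rw [PySem.Chars.count.go.eq_def]
    simp only []
    by_cases hpre : ['H','.','H'] <+: (c::t)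
    · obtain ⟨u, hu⟩ := hpre
      have hpreb : List.isPrefixOf ['H','.','H'] (c::t) = true := by
        rw [List.isPrefixOf_iff_prefix]; exact ⟨u, hu⟩
      simp only [hpreb, if_pos]
      rw [show ((c::t).drop ['H','.','H'].length) = u by rw [← hu]; simp]
      rw [IH u.length (by rw [← hu] at *; simp; omega) u rfl f (acc+1)
        (by rw [← hu] at hfuel; simp at hfuel ⊢; omega)]
      rw [show (c::t) = 'H'::'.'::'H'::u by rw [← hu]; rfl]
      rw [cHdH_HdH]
      omega
    · have hpreb : List.isPrefixOf ['H','.','H'] (c::t) = false := by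
        rw [Bool.eq_false_iff]
        intro hx
        exact hpre (List.isPrefixOf_iff_prefix.mp hx)
      simp only [hpreb]
      rw [if_neg (by simp)]
      rw [IH t.length (by simp) t rfl f acc (by simp at hfuel; omega)]
      rw [cHdH_cons_not c t hpre]
theorem countH_eq (s : String) : PySem.Str.count s "H" = s.toList.count 'H' := by
  rw [PySem.Str.count_eq]
  show PySem.Chars.count s.toList ['H'] = _
  rw [PySem.Chars.count]
  rw [if_neg (by simp)]
  rw [goH_eq s.toList s.toList.length 0 (le_refl _)]
  omega
theorem countHdH_eq (s : String) : PySem.Str.count s "H.H" = cHdH s.toList := by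
  rw [PySem.Str.count_eq]
  show PySem.Chars.count s.toList ['H','.','H'] = _
  rw [PySem.Chars.count]
  rw [if_neg (by simp)]
  rw [goHdH_eq s.toList.length s.toList rfl s.toList.length 0 (le_refl _)]
  omega
theorem main_eq (s : String) (hpre : ¬ ['#','H'] <:+: s.toList) :
    minimumBuckets s = minimumBuckets_alt s := by
  have hA := lemA s.toList.length s.toList rfl hpre [] 0
  simp only [List.nil_append, List.length_nil] at hA
  have hcat : catOf (List.getLast? ([] : List Char)) = PvSt.other := by simp [catOf]
  rw [hcat] at hA
  have hB := lemB s.toList []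
  simp only [List.nil_append, List.length_nil] at hB
  have hL0 : ((List.getLast? ([] : List Char)) == some '.') = false := by simp
  rw [hL0] at hB
  obtain ⟨hC1, hC2⟩ := lemC s.toList.length s.toList rfl
  unfold minimumBuckets minimumBuckets_alt
  cases hw : wBad false s.toList with
  | true =>
    rw [hA, hC1 hw, hB, hw]
    simp
  | false =>
    rw [hA, hC2 hw, hB, hw]
    rw [countH_eq, countHdH_eq]
    have hle := cHdH_le_count s.toList
    simp [Option.elim]
    omega

-- ===== VERDICT (by name: the statement is the Claim_ definition above) =====
theorem minimumBuckets_spec : Claim_equal_minimumBuckets := by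
  intro hamsters _ hpre
  unfold Spec_minimumBuckets minimumBuckets
  refine main_eq hamsters ?_
  intro hx
  have h2 : ("#H".toList) = ['#','H'] := by decide
  have h3 : PySem.Str.isIn "#H" hamsters = true := by
    rw [PySem.Str.isIn_eq]
    exact (PySem.Chars.isIn_iff_infix _ _).mpr (by rw [h2]; exact hx)
  rw [hpre] at h3
  simp at h3
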